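-- pv_equiv track=rewrite | github.com/cannmirror/ops-transformer | experimental/attention/quant_lightning_indexer/tests/pytest/quant_lightning_indexer_golden.py | trans_tnd_actseq
-- ===== SOURCE A (Python) =====
-- def trans_tnd_actseq(list):
--     list_len = len(list)
--     if list_len == 0:
--         raise ValueError(f'TND情况下 act_seq需要必传')
--     list_new = []
--     list_new.append(list[0])
--     for i in range(list_len - 1):
--         new_item = list[i + 1] - list[i]
--         if new_item >= 0:
--             list_new.append(new_item)
--         else:
--             raise ValueError(f'TND情况下 act_seq_len 为非递减数列 act_seq_len={list}')
--     return list_new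
-- ===== SOURCE B (Python) =====
-- def trans_tnd_actseq(list):
--     if len(list) == 0:
--         raise ValueError(f'TND情况下 act_seq需要必传')
--     # validate by comparison with the sorted copy: non-decreasing <=> equal to its sorted self
--     if list != sorted(list):
--         raise ValueError(f'TND情况下 act_seq_len 为非递减数列 act_seq_len={list}')
--     # build the per-element diffs back-to-front, then reverse
--     out = []
--     for i in range(len(list) - 1, 0, -1):
--         out.append(list[i] - list[i - 1])
--     out.append(list[0])
--     out.reverse()
--     return out
-- ===== Notes on version B (the rewrite author's own statement) =====
-- stated objective: alternative
-- what changed: B validates non-decreasingness by comparing the list with its sorted copy (instead of checking each diff as it is produced) and builds the diff list back-to-front with a countdown index loop followed by a reverse.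
import Mathlib
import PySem

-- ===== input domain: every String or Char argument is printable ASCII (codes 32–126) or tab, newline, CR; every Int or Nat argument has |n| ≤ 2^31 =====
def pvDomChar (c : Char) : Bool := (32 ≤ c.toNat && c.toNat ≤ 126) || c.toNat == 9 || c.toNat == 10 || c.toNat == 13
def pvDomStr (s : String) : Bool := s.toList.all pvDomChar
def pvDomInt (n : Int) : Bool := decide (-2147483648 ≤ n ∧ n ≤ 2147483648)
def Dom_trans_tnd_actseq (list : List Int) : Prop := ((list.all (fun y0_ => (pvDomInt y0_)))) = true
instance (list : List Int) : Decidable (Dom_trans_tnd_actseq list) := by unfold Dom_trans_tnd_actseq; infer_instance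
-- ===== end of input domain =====

-- B validates by comparing the list with its sorted copy and builds the diff list
-- back-to-front (countdown index loop, then reverse), instead of A's forward loop
-- that interleaves diffing and validation; alternative decomposition, same result.


-- ===== PORT A =====
-- A's loop over i in range(len-1): list_new carries the appended diffs; `none` is the
-- ValueError raise (unreachable under Pre_).
def transAGo : List Int → List Int → Option (List Int)
  | a :: b :: t, acc => if b - a ≥ 0 then transAGo (b :: t) (acc ++ [b - a]) else none
  | _, acc => some acc

def trans_tnd_actseq (list : List Int) : List Int :=
  match list with
  | [] => []  -- Python raises ValueError here; excluded by Pre_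
  | x :: _ => (transAGo list [x]).getD []

-- ===== PORT B =====
def trans_tnd_actseq_alt (list : List Int) : List Int :=
  match list with
  | [] => []  -- Python raises ValueError here; excluded by Pre_
  | _ :: _ =>
    if list ≠ PySem.List.sorted list (fun y => y) then []  -- Python raises ValueError; excluded by Pre_
    else
      -- for i in range(len(list) - 1, 0, -1): out.append(list[i] - list[i-1])
      let out := (PySem.List.pyRange ((list.length : Int) - 1) 0 (-1)).foldl
        (fun acc i => acc ++ [PySem.List.pyGetD list i 0 - PySem.List.pyGetD list (i - 1) 0]) []
      -- out.append(list[0]); out.reverse()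
      (out ++ [PySem.List.pyGetD list 0 0]).reverse

-- ===== PRECONDITION & SPEC =====
-- Pre_ excludes exactly the inputs on which A raises ValueError: the empty list and
-- lists that are not non-decreasing.
def Pre_trans_tnd_actseq (list : List Int) : Prop :=
  list ≠ [] ∧ List.IsChain (· ≤ ·) list
instance (list : List Int) : Decidable (Pre_trans_tnd_actseq list) := by
  unfold Pre_trans_tnd_actseq; infer_instance
def pvWitness_trans_tnd_actseq : List Int := [1, 3, 3, 7]

def Spec_trans_tnd_actseq (list : List Int) (out : List Int) : Prop := out = trans_tnd_actseq_alt list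
instance (list : List Int) (out : List Int) : Decidable (Spec_trans_tnd_actseq list out) := by unfold Spec_trans_tnd_actseq; infer_instance

-- ===== CLAIM (what is proved, stated in full; the proofs are below) =====
def Claim_equal_trans_tnd_actseq : Prop := ∀ (list : List Int), Dom_trans_tnd_actseq list → Pre_trans_tnd_actseq list → Spec_trans_tnd_actseq list (trans_tnd_actseq list)

-- ===== LEMMAS AND PROOFS =====
-- A's loop on a non-decreasing list never hits the raise and appends every consecutive diff.
theorem transAGo_chain (l : List Int) (h : List.IsChain (· ≤ ·) l) :
    ∀ acc : List Int,
      transAGo l acc = some (acc ++ List.zipWith (fun a b => b - a) l l.tail) := by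
  induction l with
  | nil => intro acc; simp [transAGo]
  | cons a t ih =>
    intro acc
    cases t with
    | nil => simp [transAGo]
    | cons b t' =>
      rw [List.isChain_cons] at h
      have hle : a ≤ b := h.1 b rfl
      simp only [transAGo, if_pos (by omega : b - a ≥ 0)]
      rw [ih h.2]
      simp

-- B's countdown loop, reversed, is the forward list of consecutive diffs.
theorem map_diff_pyRange (xs : List Int) :
    (PySem.List.pyRange 1 (xs.length : Int) 1).map
        (fun i => PySem.List.pyGetD xs i 0 - PySem.List.pyGetD xs (i - 1) 0)
      = List.zipWith (fun a b => b - a) xs xs.tail := by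
  apply List.ext_getElem
  · simp [PySem.List.length_pyRange_one]
  · intro k h1 h2
    have hk : k < xs.length - 1 := by
      simpa [PySem.List.length_pyRange_one] using h1
    rw [List.getElem_map, PySem.List.getElem_pyRange_one, List.getElem_zipWith]
    have e1 : PySem.List.pyGetD xs (1 + (k : Int)) 0 = xs[k + 1]'(by omega) := by
      rw [show (1 + (k : Int)) = ((k + 1 : Nat) : Int) by omega]
      rw [PySem.List.pyGetD_natCast]
      exact List.getD_eq_getElem _ _ (by omega)
    have e2 : PySem.List.pyGetD xs (1 + (k : Int) - 1) 0 = xs[k]'(by omega) := by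
      rw [show (1 + (k : Int) - 1) = ((k : Nat) : Int) by omega]
      rw [PySem.List.pyGetD_natCast]
      exact List.getD_eq_getElem _ _ (by omega)
    rw [e1, e2, List.getElem_tail]

-- ===== VERDICT (by name: the statement is the Claim_ definition above) =====
theorem trans_tnd_actseq_spec : Claim_equal_trans_tnd_actseq := by
  intro list _ hpre
  obtain ⟨hne, hch⟩ := hpre
  cases list with
  | nil => exact absurd rfl hne
  | cons x rest =>
    show trans_tnd_actseq (x :: rest) = trans_tnd_actseq_alt (x :: rest)
    have hsorted : PySem.List.sorted (x :: rest) (fun y => y) = x :: rest :=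
      PySem.List.sorted_eq_self_of_pairwise _ _ hch.pairwise
    simp only [trans_tnd_actseq, trans_tnd_actseq_alt, hsorted, ne_eq, not_true_eq_false,
      if_neg, not_false_eq_true]
    rw [transAGo_chain _ hch]
    rw [PySem.List.foldl_append_singleton_eq_map]
    rw [PySem.List.pyRange_neg_one_eq_reverse]
    norm_num
    rw [show ((rest.length : Int) + 1) = (((x :: rest).length : Int)) by simp]
    exact (map_diff_pyRange (x :: rest)).symm
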